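-- pv_equiv track=rewrite | github.com/taejune/my-algo-solvings | src/com/taejune/algorithm/acmp/2193/solve.py | count
-- ===== SOURCE A (Python) =====
-- def count(n):
-- 	d = {};
-- 	d[1] = {0: 0, 1: 1};
--
-- 	for i in range(2, n+1):
-- 		d[i] = {};
-- 		d[i][0] = d[i-1][0] + d[i-1][1] ;
-- 		d[i][1] = d[i-1][0];
--
-- 	return d;
-- ===== SOURCE B (Python) =====
-- def count(n):
--     # closed-form per row: each row is computed independently from a
--     # fast-doubling Fibonacci (F(0)=0, F(1)=1), not from the previous row.
--     def fib(k):
--         # returns (F(k), F(k+1)) by fast doubling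
--         if k == 0:
--             return (0, 1)
--         a, b = fib(k // 2)
--         c = a * (2 * b - a)
--         d = a * a + b * b
--         if k % 2 == 1:
--             return (d, c + d)
--         return (c, d)
--     table = {1: {0: 0, 1: 1}}
--     for i in range(2, n + 1):
--         a, b = fib(i - 1)
--         table[i] = {0: a, 1: b - a}
--     return table
-- ===== Notes on version B (the rewrite author's own statement) =====
-- stated objective: alternative
-- what changed: B computes each row of the table independently from a closed-form fast-doubling Fibonacci function (one logarithmic-depth recursive call per row, the row's two entries taken from the returned Fibonacci pair), instead of A's single forward pass that derives each row from the previous one by nested-dict lookups.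
import Mathlib
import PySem

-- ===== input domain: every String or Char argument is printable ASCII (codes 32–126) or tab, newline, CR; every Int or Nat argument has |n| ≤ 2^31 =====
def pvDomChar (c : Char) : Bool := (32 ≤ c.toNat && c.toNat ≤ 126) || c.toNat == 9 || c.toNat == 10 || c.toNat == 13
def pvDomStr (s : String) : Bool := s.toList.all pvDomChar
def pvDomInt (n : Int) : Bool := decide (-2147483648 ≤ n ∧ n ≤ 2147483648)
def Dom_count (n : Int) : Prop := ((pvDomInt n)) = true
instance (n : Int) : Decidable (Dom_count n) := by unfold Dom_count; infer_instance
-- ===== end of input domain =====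

-- B computes each row independently from a closed-form fast-doubling Fibonacci
-- instead of A's forward pass chaining nested-dict lookups (objective: alternative).


-- ===== PORT A =====
-- the loop body: d[i] = {}; d[i][0] = d[i-1][0] + d[i-1][1]; d[i][1] = d[i-1][0]
-- (each statement is one store into d; the item writes fetch d[i] and store it back)
def countStep (d : PySem.Dict Int (PySem.Dict Int Int)) (i : Int) :
    PySem.Dict Int (PySem.Dict Int Int) :=
  let d := d.insert i PySem.Dict.empty
  let d := d.insert i ((d.getD i PySem.Dict.empty).insert 0
      ((d.getD (i-1) PySem.Dict.empty).getD 0 0 + (d.getD (i-1) PySem.Dict.empty).getD 1 0))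
  let d := d.insert i ((d.getD i PySem.Dict.empty).insert 1
      ((d.getD (i-1) PySem.Dict.empty).getD 0 0))
  d

def count (n : Int) : List (Int × List (Int × Int)) :=
  let d : PySem.Dict Int (PySem.Dict Int Int) := PySem.Dict.empty
  let d := d.insert 1 ((PySem.Dict.empty.insert 0 0).insert 1 1)
  let d := (PySem.List.pyRange 2 (n+1) 1).foldl countStep d
  d.items.map (fun p => (p.1, p.2.items))

-- ===== PORT B =====
-- fib(k) = (F(k), F(k+1)) by fast doubling; recursion on k // 2
def fibFD : Nat → Int × Int
  | 0 => (0, 1)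
  | (k+1) =>
      let p := fibFD ((k+1)/2)
      let a := p.1
      let b := p.2
      let c := a * (2*b - a)
      let d := a*a + b*b
      if (k+1) % 2 == 1 then (d, c+d) else (c, d)
decreasing_by omega

-- a, b = fib(i-1); table[i] = {0: a, 1: b - a}; in the loop i ≥ 2, so i-1 ≥ 0
-- and .toNat is exact there
def count_alt (n : Int) : List (Int × List (Int × Int)) :=
  let table := PySem.Dict.empty.insert 1 ((PySem.Dict.empty.insert 0 0).insert 1 1)
  let table := (PySem.List.pyRange 2 (n+1) 1).foldl
    (fun t i =>
      let p := fibFD (i-1).toNat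
      t.insert i ((PySem.Dict.empty.insert 0 p.1).insert 1 (p.2 - p.1)))
    table
  table.items.map (fun p => (p.1, p.2.items))

-- ===== PRECONDITION & SPEC =====
def Spec_count (n : Int) (out : List (Int × List (Int × Int))) : Prop := out = count_alt n
instance (n : Int) (out : List (Int × List (Int × Int))) : Decidable (Spec_count n out) := by unfold Spec_count; infer_instance

-- ===== CLAIM (what is proved, stated in full; the proofs are below) =====
def Claim_equal_count : Prop := ∀ (n : Int), Dom_count n → Spec_count n (count n)

-- ===== LEMMAS AND PROOFS =====

-- the shared Fibonacci values: fibG (i) = row (i)'s 0-entry, with fibG 0 = 1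
def fibG : Nat → Int
  | 0 => 1
  | 1 => 0
  | (t+2) => fibG (t+1) + fibG t

def innerD (t : Nat) : PySem.Dict Int Int :=
  (PySem.Dict.empty.insert 0 (fibG (t+1))).insert 1 (fibG t)

-- the common table after t loop iterations, keys 1 .. t+1
def tableD : Nat → PySem.Dict Int (PySem.Dict Int Int)
  | 0 => PySem.Dict.empty.insert 1 (innerD 0)
  | (t+1) => (tableD t).insert ((t:Int)+2) (innerD (t+1))

lemma get?_tableD_last (t : Nat) :
    (tableD t).get? ((t:Int)+1) = some (innerD t) := by
  cases t with
  | zero => simp [tableD, PySem.Dict.get?_insert_self]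
  | succ t =>
      rw [tableD]
      have : ((t+1:Nat):Int) + 1 = (t:Int) + 2 := by push_cast; omega
      rw [this, PySem.Dict.get?_insert_self]

lemma getD_innerD_zero (t : Nat) : (innerD t).getD 0 0 = fibG (t+1) := by
  simp [innerD, PySem.Dict.getD_insert_of_ne, PySem.Dict.getD_insert_self]

lemma getD_innerD_one (t : Nat) : (innerD t).getD 1 0 = fibG t := by
  simp [innerD, PySem.Dict.getD_insert_self]

lemma countStep_tableD (t : Nat) :
    countStep (tableD t) ((t:Int)+2) = tableD (t+1) := by
  have e : (t:Int)+2-1 = (t:Int)+1 := by omega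
  have hprev : (tableD t).getD ((t:Int)+1) PySem.Dict.empty = innerD t := by
    rw [PySem.Dict.getD_eq_get?_getD, get?_tableD_last]; rfl
  simp only [countStep, e, PySem.Dict.insert_insert_self, PySem.Dict.getD_insert_self,
    PySem.Dict.getD_insert, if_neg (show ¬((t:Int)+1 = (t:Int)+2) by omega), hprev,
    getD_innerD_zero, getD_innerD_one]
  rw [tableD]
  congr 1

-- A's loop result
lemma countLoop_eq (t : Nat) :
    (PySem.List.pyRange 2 ((t:Int)+1+1) 1).foldl countStep
      (PySem.Dict.empty.insert 1 ((PySem.Dict.empty.insert 0 0).insert 1 1)) = tableD t := by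
  induction t with
  | zero =>
      rw [PySem.List.pyRange_one_eq_nil (by omega)]
      rfl
  | succ t ih =>
      have h1 : ((t+1:Nat):Int)+1+1 = ((t:Int)+2)+1 := by push_cast; omega
      rw [h1, PySem.List.pyRange_one_succ_right (by omega), List.foldl_append]
      have h2 : ((t:Int)+2) = (t:Int)+1+1 := by omega
      rw [show PySem.List.pyRange 2 ((t:Int)+2) 1 = PySem.List.pyRange 2 ((t:Int)+1+1) 1 from by rw [h2]]
      rw [ih]
      simpa using countStep_tableD t

-- fast doubling computes the standard Fibonacci pair
lemma fibFD_eq (k : Nat) : fibFD k = ((Nat.fib k : Int), (Nat.fib (k+1) : Int)) := by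
  induction k using Nat.strong_induction_on with
  | _ k ih =>
    match k with
    | 0 => simp [fibFD]
    | (j+1) =>
      rw [fibFD, ih ((j+1)/2) (by omega)]
      have hmono : Nat.fib ((j+1)/2) ≤ 2 * Nat.fib ((j+1)/2 + 1) := by
        have := Nat.fib_le_fib_succ (n := (j+1)/2)
        omega
      have heven : (Nat.fib (2 * ((j+1)/2)) : Int)
          = (Nat.fib ((j+1)/2) : Int) * (2 * (Nat.fib ((j+1)/2 + 1) : Int) - (Nat.fib ((j+1)/2) : Int)) := by
        have h := Nat.fib_two_mul ((j+1)/2)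
        have : ((Nat.fib ((j+1)/2) * (2 * Nat.fib ((j+1)/2 + 1) - Nat.fib ((j+1)/2)) : Nat) : Int)
            = (Nat.fib ((j+1)/2) : Int) * (2 * (Nat.fib ((j+1)/2 + 1) : Int) - (Nat.fib ((j+1)/2) : Int)) := by
          push_cast [Nat.cast_sub hmono]
          ring
        rw [h, this]
      have hodd : (Nat.fib (2 * ((j+1)/2) + 1) : Int)
          = (Nat.fib ((j+1)/2) : Int) * (Nat.fib ((j+1)/2) : Int)
            + (Nat.fib ((j+1)/2 + 1) : Int) * (Nat.fib ((j+1)/2 + 1) : Int) := by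
        have h := Nat.fib_two_mul_add_one ((j+1)/2)
        rw [h]; push_cast; ring
      rcases Nat.even_or_odd (j+1) with he | ho
      · obtain ⟨m, hm⟩ := he
        have hdiv : (j+1)/2 = m := by omega
        have hmod : (j+1) % 2 = 0 := by omega
        simp only [hdiv, hmod]
        have h2m : j + 1 = 2 * m := by omega
        have h2m1 : j + 1 + 1 = 2 * m + 1 := by omega
        rw [h2m1, h2m]
        simp only [hdiv] at heven hodd
        simp [heven, hodd]
      · obtain ⟨m, hm⟩ := ho
        have hdiv : (j+1)/2 = m := by omega
        have hmod : (j+1) % 2 = 1 := by omega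
        simp only [hdiv, hmod]
        have h2m : j + 1 = 2 * m + 1 := by omega
        have h2m1 : j + 1 + 1 = 2 * m + 2 := by omega
        rw [h2m1, h2m]
        simp only [hdiv] at heven hodd
        have hstep : (Nat.fib (2*m+2) : Int) = (Nat.fib (2*m) : Int) + (Nat.fib (2*m+1) : Int) := by
          have := Nat.fib_add_two (n := 2*m)
          push_cast [this]; ring
        rw [if_pos (by decide), hstep, hodd, heven]

-- fibG is the shifted standard Fibonacci
lemma fibG_succ_eq (k : Nat) : fibG (k+1) = (Nat.fib k : Int) := by
  induction k using Nat.twoStepInduction with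
  | zero => simp [fibG]
  | one => simp [fibG]
  | more k ih1 ih2 =>
      rw [show k+2+1 = (k+1)+1+1 from rfl, fibG, ih1, ih2, Nat.fib_add_two]
      push_cast; ring

-- B's loop step at i = t+2 produces the same row as A's
lemma altStep_row (t : Nat) :
    ((PySem.Dict.empty.insert 0 (fibFD (((t:Int)+2-1)).toNat).1).insert 1
      ((fibFD (((t:Int)+2-1)).toNat).2 - (fibFD (((t:Int)+2-1)).toNat).1)) = innerD (t+1) := by
  have e1 : ((t:Int)+2-1).toNat = t+1 := by omega
  have hsub : (Nat.fib (t+1+1) : Int) - (Nat.fib (t+1) : Int) = (Nat.fib t : Int) := by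
    have := Nat.fib_add_two (n := t)
    push_cast [this]; ring
  rw [e1, fibFD_eq, innerD,
    show (t:Nat)+1+1 = (t+1)+1 from rfl, fibG_succ_eq, fibG_succ_eq]
  simp [hsub]

-- B's loop result
lemma altLoop_eq (t : Nat) :
    (PySem.List.pyRange 2 ((t:Int)+1+1) 1).foldl
      (fun d i =>
        let p := fibFD (i-1).toNat
        d.insert i ((PySem.Dict.empty.insert 0 p.1).insert 1 (p.2 - p.1)))
      (PySem.Dict.empty.insert 1 ((PySem.Dict.empty.insert 0 0).insert 1 1)) = tableD t := by
  induction t with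
  | zero =>
      rw [PySem.List.pyRange_one_eq_nil (by omega)]
      rfl
  | succ t ih =>
      have h1 : ((t+1:Nat):Int)+1+1 = ((t:Int)+2)+1 := by push_cast; omega
      rw [h1, PySem.List.pyRange_one_succ_right (by omega), List.foldl_append]
      have h2 : ((t:Int)+2) = (t:Int)+1+1 := by omega
      rw [show PySem.List.pyRange 2 ((t:Int)+2) 1 = PySem.List.pyRange 2 ((t:Int)+1+1) 1 from by rw [h2]]
      rw [ih]
      simp only [List.foldl_cons, List.foldl_nil, altStep_row]
      rw [tableD]

-- ===== VERDICT (by name: the statement is the Claim_ definition above) =====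
theorem count_spec : Claim_equal_count := by
  intro n _
  show count n = count_alt n
  by_cases h : 1 ≤ n
  · have hn : n = ((n-1).toNat : Int) + 1 := by omega
    rw [count, count_alt, hn, countLoop_eq, altLoop_eq]
  · have hnil : PySem.List.pyRange 2 (n+1) 1 = [] :=
      PySem.List.pyRange_one_eq_nil (by omega)
    rw [count, count_alt, hnil]
    rfl
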